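-- pv_equiv track=rewrite | github.com/ch1pkav/dotfaylu-ostapa | Code/User/History/4610b88f/O60Z.py | dfs
-- ===== SOURCE A (Python) =====
-- def dfs(vertex, visited, graph, weights):
--     minv = 99999999999
--     stack = []
--     stack.append(vertex)
--     # visited[vertex] = True
--     while(stack):
--         vertex= stack.pop()
--         minv = min(minv, weights[vertex])
--         if not(vertex in visited):
--             visited.add(vertex)
--         for v in graph[vertex]:
--             if not (v in visited):
--                 stack.append(v)
--     return minv, visited
-- ===== SOURCE B (Python) =====
-- def dfs(vertex, visited, graph, weights):
--     # Recursive DFS: each vertex's answer is min(sentinel, its weight) folded with the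
--     # answers of its not-yet-visited neighbours (taken in reverse, preserving stack order).
--     # The driver below merely trampolines the recursion through generator frames so that
--     # deep graphs do not hit CPython's recursion limit; it is the identical recursion.
--     def visit(v):
--         m = min(99999999999, weights[v])
--         visited.add(v)
--         for u in reversed(graph[v]):
--             if u not in visited:
--                 m = min(m, (yield u))
--         return m
--     frames = [visit(vertex)]
--     ret = None
--     while frames:
--         try:
--             child = frames[-1].send(ret)
--         except StopIteration as e:
--             ret = e.value
--             frames.pop()
--         else:
--             frames.append(visit(child))
--             ret = None
--     return ret, visited
-- ===== Notes on version B (the rewrite author's own statement) =====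
-- stated objective: alternative
-- what changed: Replaces the explicit stack loop (which pushes duplicate entries and folds everything into one global min accumulator) by a recursive DFS that marks a vertex and folds its weight with the minima returned by recursive calls on its not-yet-visited neighbours, trampolined through generator frames only to escape CPython's recursion limit.
import Mathlib
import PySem

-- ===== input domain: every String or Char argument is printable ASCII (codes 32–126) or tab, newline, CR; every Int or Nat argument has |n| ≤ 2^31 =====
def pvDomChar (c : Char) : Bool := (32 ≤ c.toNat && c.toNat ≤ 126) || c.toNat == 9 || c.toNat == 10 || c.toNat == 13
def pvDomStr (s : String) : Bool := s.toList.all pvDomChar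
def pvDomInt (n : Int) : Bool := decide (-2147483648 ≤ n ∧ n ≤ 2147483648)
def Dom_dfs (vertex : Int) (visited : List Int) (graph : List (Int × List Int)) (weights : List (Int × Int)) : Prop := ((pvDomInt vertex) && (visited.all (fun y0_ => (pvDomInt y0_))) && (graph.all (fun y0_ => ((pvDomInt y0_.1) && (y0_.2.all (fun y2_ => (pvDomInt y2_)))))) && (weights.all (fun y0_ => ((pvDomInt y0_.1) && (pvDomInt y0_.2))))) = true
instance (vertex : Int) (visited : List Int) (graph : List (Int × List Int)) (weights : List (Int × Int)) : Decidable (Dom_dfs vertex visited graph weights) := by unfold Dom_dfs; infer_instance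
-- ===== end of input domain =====

-- B replaces A's explicit stack (with its duplicate entries and a global min accumulator) by a
-- recursive DFS that folds each vertex's weight with the minima returned for its unvisited
-- neighbours (objective: alternative decomposition, same cost). Both A and B mutate the Python
-- set `visited` in place in the same way; the equivalence proved here is about the return value.

-- ===== PORT A =====
-- fuel for the while-loop: an upper bound on the number of iterations, used only as a
-- totality guard (proved sufficient below; the loop itself is a literal transliteration)
def dfsFuel (graph : List (Int × List Int)) : Nat :=
  ((graph.map Prod.fst).toFinset.sum (fun k => 1 + (PySem.Dict.getD ⟨graph⟩ k []).length)) + 2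

def dfsLoop (graph : List (Int × List Int)) (weights : List (Int × Int)) :
    Nat → List Int → Int → List Int → Int × List Int
  | 0, _, minv, vis => (minv, vis)
  | f + 1, stack, minv, vis =>
    match PySem.List.pop? stack with
    | none => (minv, vis)                                    -- while(stack) is false
    | some (v, rest) =>                                      -- vertex = stack.pop()
      let minv := min minv (PySem.Dict.getD ⟨weights⟩ v 0)   -- minv = min(minv, weights[vertex])
      let vis := if PySem.Set.contains vis v then vis else PySem.Set.add vis v
      let stack' := (PySem.Dict.getD ⟨graph⟩ v []).foldl
        (fun st u => if PySem.Set.contains vis u then st else st ++ [u]) rest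
      dfsLoop graph weights f stack' minv vis

def dfs (vertex : Int) (visited : List Int) (graph : List (Int × List Int)) (weights : List (Int × Int)) : Int × List Int :=
  dfsLoop graph weights (dfsFuel graph) [vertex] 99999999999 visited

-- ===== PORT B =====
-- `goB` is Source B's recursive `visit` (the generator trampoline in Source B only evades CPython's
-- recursion limit; the recursion is this one). Fuel is a totality guard: the recursion only
-- descends into fresh vertices, so depth never exceeds graph.length + 1.
mutual
def goB (graph : List (Int × List Int)) (weights : List (Int × Int)) :
    Nat → Int → List Int → Int × List Int
  | f, v, vis =>
    let m := min 99999999999 (PySem.Dict.getD ⟨weights⟩ v 0)  -- m = min(99999999999, weights[v])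
    let vis := PySem.Set.add vis v                            -- visited.add(v)
    match f with
    | 0 => (m, vis)
    | f + 1 => goLB graph weights f (PySem.Dict.getD ⟨graph⟩ v []).reverse m vis
termination_by f _ _ => (f, 0)

def goLB (graph : List (Int × List Int)) (weights : List (Int × Int)) :
    Nat → List Int → Int → List Int → Int × List Int          -- for u in reversed(graph[v]): …
  | _, [], m, vis => (m, vis)
  | f, u :: us, m, vis =>
    if PySem.Set.contains vis u then goLB graph weights f us m vis
    else
      let r := goB graph weights f u vis                      -- m = min(m, visit(u))
      goLB graph weights f us (min m r.1) r.2
termination_by f us _ _ => (f, us.length + 1)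
end

def dfs_alt (vertex : Int) (visited : List Int) (graph : List (Int × List Int)) (weights : List (Int × Int)) : Int × List Int :=
  goB graph weights (graph.length + 1) vertex visited

-- ===== PRECONDITION & SPEC =====
-- A dereferences weights[v] and graph[v] for exactly the vertices reachable from `vertex`
-- through not-initially-visited vertices; it raises KeyError iff one of them is missing a key.
-- Pre_ states that every vertex in that reachability closure — the standard graph closure of
-- the INPUT, computed by saturating "add unvisited neighbours" (no stack, no weights, no min,
-- nothing of A's algorithm) — is keyed in both dicts: exactly the inputs on which A returns.
def pvGrow (graph : List (Int × List Int)) (visited : List Int) (S : List Int) : List Int :=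
  S.foldl (fun acc v => (PySem.Dict.getD ⟨graph⟩ v []).foldl
    (fun acc u => if u ∈ visited ∨ u ∈ acc then acc else acc ++ [u]) acc) S

def pvReach (vertex : Int) (visited : List Int) (graph : List (Int × List Int)) : List Int :=
  (List.range (graph.length + 1)).foldl (fun S _ => pvGrow graph visited S) [vertex]

def Pre_dfs (vertex : Int) (visited : List Int) (graph : List (Int × List Int)) (weights : List (Int × Int)) : Prop :=
  ∀ v ∈ pvReach vertex visited graph, v ∈ graph.map Prod.fst ∧ v ∈ weights.map Prod.fst
instance (vertex : Int) (visited : List Int) (graph : List (Int × List Int)) (weights : List (Int × Int)) : Decidable (Pre_dfs vertex visited graph weights) := by unfold Pre_dfs; infer_instance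

def pvWitness_dfs : Int × List Int × (List (Int × List Int)) × (List (Int × Int)) :=
  (0, [], [(0, [1]), (1, [0])], [(0, 5), (1, 3)])

def Spec_dfs (vertex : Int) (visited : List Int) (graph : List (Int × List Int)) (weights : List (Int × Int)) (out : Int × List Int) : Prop := out = dfs_alt vertex visited graph weights
instance (vertex : Int) (visited : List Int) (graph : List (Int × List Int)) (weights : List (Int × Int)) (out : Int × List Int) : Decidable (Spec_dfs vertex visited graph weights out) := by unfold Spec_dfs; infer_instance

-- ===== CLAIM (what is proved, stated in full; the proofs are below) =====
def Claim_equal_dfs : Prop := ∀ (vertex : Int) (visited : List Int) (graph : List (Int × List Int)) (weights : List (Int × Int)), Dom_dfs vertex visited graph weights → Pre_dfs vertex visited graph weights → Spec_dfs vertex visited graph weights (dfs vertex visited graph weights)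

-- ===== LEMMAS AND PROOFS =====

-- the distinct keys of the graph dict
def keysF (g : List (Int × List Int)) : Finset Int := (g.map Prod.fst).toFinset
-- number of unvisited keys (bounds B's recursion depth)
def Ucard (g : List (Int × List Int)) (vis : List Int) : Nat :=
  ((keysF g).filter (fun k => ¬ k ∈ vis)).card
-- remaining work of A's loop (bounds its iteration count)
def Ssum (g : List (Int × List Int)) (vis : List Int) : Nat :=
  ((keysF g).filter (fun k => ¬ k ∈ vis)).sum (fun k => 1 + (PySem.Dict.getD ⟨g⟩ k []).length)
def mu (g : List (Int × List Int)) (stack vis : List Int) : Nat := stack.length + Ssum g vis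

-- loop invariant of A: minv is below the sentinel, and any already-visited vertex still on the
-- stack was fully processed: its weight is absorbed in minv and each of its neighbours is
-- either visited or scheduled above it on the stack.
def LoopInv (g : List (Int × List Int)) (w : List (Int × Int)) (stack vis : List Int) (minv : Int) : Prop :=
  minv ≤ 99999999999 ∧
  ∀ (i : Nat) (h : i < stack.length), stack[i] ∈ vis →
    (minv ≤ PySem.Dict.getD ⟨w⟩ stack[i] 0 ∧
     ∀ u ∈ PySem.Dict.getD ⟨g⟩ stack[i] [], u ∈ vis ∨ u ∈ stack.drop (i + 1))

lemma mem_contains (vis : List Int) (x : Int) : PySem.Set.contains vis x = true ↔ x ∈ vis := by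
  simp [PySem.Set.contains]

lemma getD_nonkey (g : List (Int × List Int)) (v : Int) (d : List Int)
    (h : v ∉ g.map Prod.fst) : PySem.Dict.getD ⟨g⟩ v d = d := by
  apply PySem.Dict.getD_of_not_contains
  unfold PySem.Dict.contains
  simp only [List.any_eq_false, beq_iff_eq, Prod.forall]
  exact fun a b hab he => h (List.mem_map.mpr ⟨(a, b), hab, he⟩)

lemma mem_keysF (g : List (Int × List Int)) (v : Int) : v ∈ keysF g ↔ v ∈ g.map Prod.fst := by
  simp [keysF]

lemma contains_true {vis : List Int} {x : Int} (h : x ∈ vis) :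
    PySem.Set.contains vis x = true := (mem_contains vis x).mpr h

lemma contains_false {vis : List Int} {x : Int} (h : x ∉ vis) :
    PySem.Set.contains vis x = false := by
  simp [PySem.Set.contains, h]

lemma goLB_nil (g : List (Int × List Int)) (w : List (Int × Int)) (f : Nat) (m : Int) (vis : List Int) :
    goLB g w f [] m vis = (m, vis) := by
  simp only [goLB]

lemma goLB_cons_mem (g : List (Int × List Int)) (w : List (Int × Int)) (f : Nat) {u : Int}
    (us : List Int) (m : Int) {vis : List Int} (h : u ∈ vis) :
    goLB g w f (u :: us) m vis = goLB g w f us m vis := by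
  simp only [goLB, contains_true h, if_true]

lemma goLB_cons_not_mem (g : List (Int × List Int)) (w : List (Int × Int)) (f : Nat) {u : Int}
    (us : List Int) (m : Int) {vis : List Int} (h : u ∉ vis) :
    goLB g w f (u :: us) m vis =
      goLB g w f us (min m (goB g w f u vis).1) (goB g w f u vis).2 := by
  simp only [goLB, contains_false h, Bool.false_eq_true, if_false]

lemma if_add (vis : List Int) (v : Int) :
    (if PySem.Set.contains vis v then vis else PySem.Set.add vis v) = PySem.Set.add vis v := by
  by_cases h : PySem.Set.contains vis v
  · rw [if_pos h, PySem.Set.add, if_pos h]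
  · rw [if_neg h]

lemma subset_add (vis : List Int) (v : Int) : vis ⊆ PySem.Set.add vis v := by
  intro x hx
  exact (PySem.Set.mem_add vis v x).mpr (Or.inl hx)

lemma goB_nonkey (g : List (Int × List Int)) (w : List (Int × Int)) (f : Nat) (v : Int) (vis : List Int)
    (h : PySem.Dict.getD ⟨g⟩ v [] = ([] : List Int)) :
    goB g w f v vis = (min 99999999999 (PySem.Dict.getD ⟨w⟩ v 0), PySem.Set.add vis v) := by
  cases f with
  | zero => simp [goB]
  | succ f => simp [goB, h, goLB]

lemma subset_goLB (g : List (Int × List Int)) (w : List (Int × Int)) :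
    ∀ (f : Nat) (us : List Int) (m : Int) (vis : List Int), vis ⊆ (goLB g w f us m vis).2 := by
  intro f
  induction f with
  | zero =>
    intro us m vis
    induction us generalizing m vis with
    | nil => rw [goLB_nil]; exact fun x hx => hx
    | cons u us ihu =>
      by_cases h : u ∈ vis
      · rw [goLB_cons_mem g w 0 us m h]; exact ihu m vis
      · rw [goLB_cons_not_mem g w 0 us m h]
        refine List.Subset.trans ?_ (ihu _ _)
        show vis ⊆ (goB g w 0 u vis).2
        simp only [goB]
        exact subset_add vis u
  | succ f ihf =>
    intro us m vis
    induction us generalizing m vis with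
    | nil => rw [goLB_nil]; exact fun x hx => hx
    | cons u us ihu =>
      by_cases h : u ∈ vis
      · rw [goLB_cons_mem g w (f + 1) us m h]; exact ihu m vis
      · rw [goLB_cons_not_mem g w (f + 1) us m h]
        refine List.Subset.trans ?_ (ihu _ _)
        show vis ⊆ (goB g w (f + 1) u vis).2
        simp only [goB]
        exact List.Subset.trans (subset_add vis u) (ihf _ _ _)

lemma subset_goB (g : List (Int × List Int)) (w : List (Int × Int))
    (f : Nat) (v : Int) (vis : List Int) : vis ⊆ (goB g w f v vis).2 := by
  cases f with
  | zero => simpa [goB] using subset_add vis v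
  | succ f =>
    simp only [goB]
    exact List.Subset.trans (subset_add vis v) (subset_goLB g w f _ _ _)

lemma Ucard_mono (g : List (Int × List Int)) {vis vis' : List Int} (h : vis ⊆ vis') :
    Ucard g vis' ≤ Ucard g vis := by
  apply Finset.card_le_card
  intro x hx
  simp only [Finset.mem_filter] at hx ⊢
  exact ⟨hx.1, fun hm => hx.2 (h hm)⟩

lemma filter_add_key (g : List (Int × List Int)) (vis : List Int) (v : Int) :
    (keysF g).filter (fun k => ¬ k ∈ PySem.Set.add vis v) =
      ((keysF g).filter (fun k => ¬ k ∈ vis)).erase v := by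
  ext x
  simp only [Finset.mem_filter, Finset.mem_erase, PySem.Set.mem_add]
  tauto

lemma filter_add_nonkey (g : List (Int × List Int)) (vis : List Int) (v : Int)
    (hk : v ∉ keysF g) :
    (keysF g).filter (fun k => ¬ k ∈ PySem.Set.add vis v) =
      (keysF g).filter (fun k => ¬ k ∈ vis) := by
  ext x
  simp only [Finset.mem_filter, PySem.Set.mem_add]
  constructor
  · rintro ⟨h1, h2⟩; exact ⟨h1, fun hm => h2 (Or.inl hm)⟩
  · rintro ⟨h1, h2⟩
    refine ⟨h1, ?_⟩
    rintro (hm | rfl)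
    · exact h2 hm
    · exact hk h1

lemma Ssum_add_key (g : List (Int × List Int)) (vis : List Int) (v : Int)
    (hk : v ∈ keysF g) (hv : v ∉ vis) :
    Ssum g vis = Ssum g (PySem.Set.add vis v) + (1 + (PySem.Dict.getD ⟨g⟩ v []).length) := by
  unfold Ssum
  rw [filter_add_key]
  exact (Finset.sum_erase_add _ _ (Finset.mem_filter.mpr ⟨hk, hv⟩)).symm

lemma Ucard_add_key (g : List (Int × List Int)) (vis : List Int) (v : Int)
    (hk : v ∈ keysF g) (hv : v ∉ vis) :
    Ucard g vis = Ucard g (PySem.Set.add vis v) + 1 := by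
  unfold Ucard
  rw [filter_add_key]
  exact (Finset.card_erase_add_one (Finset.mem_filter.mpr ⟨hk, hv⟩)).symm

lemma goLB_fuelirr (g : List (Int × List Int)) (w : List (Int × Int)) :
    ∀ (n : Nat) (us : List Int) (m : Int) (vis : List Int) (f₁ f₂ : Nat),
      Ucard g vis ≤ n → Ucard g vis ≤ f₁ → Ucard g vis ≤ f₂ →
      goLB g w f₁ us m vis = goLB g w f₂ us m vis := by
  intro n
  induction n using Nat.strong_induction_on with
  | _ n ihn =>
    intro us
    induction us with
    | nil => intro m vis f₁ f₂ _ _ _; rw [goLB_nil, goLB_nil]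
    | cons u us ihu =>
      intro m vis f₁ f₂ hn h1 h2
      by_cases h : u ∈ vis
      · rw [goLB_cons_mem g w f₁ us m h, goLB_cons_mem g w f₂ us m h]
        exact ihu m vis f₁ f₂ hn h1 h2
      · rw [goLB_cons_not_mem g w f₁ us m h, goLB_cons_not_mem g w f₂ us m h]
        have hgo : goB g w f₁ u vis = goB g w f₂ u vis := by
          by_cases hk : u ∈ keysF g
          · have hU1 : Ucard g vis = Ucard g (PySem.Set.add vis u) + 1 := Ucard_add_key g vis u hk h
            obtain ⟨a, rfl⟩ : ∃ a, f₁ = a + 1 := ⟨f₁ - 1, by omega⟩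
            obtain ⟨b, rfl⟩ : ∃ b, f₂ = b + 1 := ⟨f₂ - 1, by omega⟩
            simp only [goB]
            exact ihn (n - 1) (by omega) _ _ _ _ _ (by omega) (by omega) (by omega)
          · have hG : PySem.Dict.getD ⟨g⟩ u [] = ([] : List Int) :=
              getD_nonkey g u [] (fun hm => hk ((mem_keysF g u).mpr hm))
            rw [goB_nonkey g w f₁ u vis hG, goB_nonkey g w f₂ u vis hG]
        rw [hgo]
        have hUle : Ucard g (goB g w f₂ u vis).2 ≤ Ucard g vis :=
          Ucard_mono g (subset_goB g w f₂ u vis)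
        exact ihu _ _ f₁ f₂ (by omega) (by omega) (by omega)

lemma goLB_filter (g : List (Int × List Int)) (w : List (Int × Int)) (f : Nat) (vis₀ : List Int) :
    ∀ (us : List Int) (m : Int) (vis : List Int), vis₀ ⊆ vis →
      goLB g w f us m vis = goLB g w f (us.filter (fun u => !PySem.Set.contains vis₀ u)) m vis := by
  intro us
  induction us with
  | nil => intro m vis _; rfl
  | cons u us ihu =>
    intro m vis hsub
    by_cases h0 : u ∈ vis₀
    · have h : u ∈ vis := hsub h0
      simp only [List.filter_cons, contains_true h0, Bool.not_true, Bool.false_eq_true, if_false]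
      rw [goLB_cons_mem g w f us m h]
      exact ihu m vis hsub
    · simp only [List.filter_cons, contains_false h0, Bool.not_false, if_true]
      by_cases h : u ∈ vis
      · rw [goLB_cons_mem g w f us m h, goLB_cons_mem g w f _ m h]
        exact ihu m vis hsub
      · rw [goLB_cons_not_mem g w f us m h, goLB_cons_not_mem g w f _ m h]
        exact ihu _ _ (List.Subset.trans hsub (subset_goB g w f u vis))

lemma goLB_min (g : List (Int × List Int)) (w : List (Int × Int)) (f : Nat) :
    ∀ (us : List Int) (m₁ m₂ : Int) (vis : List Int),
      goLB g w f us (min m₁ m₂) vis =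
        (min m₁ (goLB g w f us m₂ vis).1, (goLB g w f us m₂ vis).2) := by
  intro us
  induction us with
  | nil => intro m₁ m₂ vis; simp [goLB_nil]
  | cons u us ihu =>
    intro m₁ m₂ vis
    by_cases h : u ∈ vis
    · rw [goLB_cons_mem g w f us _ h, goLB_cons_mem g w f us m₂ h]
      exact ihu m₁ m₂ vis
    · rw [goLB_cons_not_mem g w f us _ h, goLB_cons_not_mem g w f us m₂ h, min_assoc]
      exact ihu m₁ _ _

lemma goLB_append (g : List (Int × List Int)) (w : List (Int × Int)) (f : Nat) :
    ∀ (a b : List Int) (m : Int) (vis : List Int),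
      goLB g w f (a ++ b) m vis =
        goLB g w f b (goLB g w f a m vis).1 (goLB g w f a m vis).2 := by
  intro a
  induction a with
  | nil => intro b m vis; simp [goLB_nil]
  | cons u a iha =>
    intro b m vis
    by_cases h : u ∈ vis
    · rw [List.cons_append, goLB_cons_mem g w f (a ++ b) m h, goLB_cons_mem g w f a m h]
      exact iha b m vis
    · rw [List.cons_append, goLB_cons_not_mem g w f (a ++ b) m h, goLB_cons_not_mem g w f a m h]
      exact iha b _ _

lemma foldl_push (vis : List Int) (rest : List Int) (l : List Int) :
    l.foldl (fun st u => if PySem.Set.contains vis u then st else st ++ [u]) rest =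
      rest ++ l.filter (fun u => !PySem.Set.contains vis u) := by
  have he : (fun (st : List Int) u => if PySem.Set.contains vis u then st else st ++ [u]) =
      (fun st u => if !PySem.Set.contains vis u then st ++ [u] else st) := by
    funext st u
    by_cases h : PySem.Set.contains vis u
    · simp only [h, if_true, Bool.not_true, Bool.false_eq_true, if_false]
    · simp only [Bool.not_eq_true] at h
      simp only [h, Bool.false_eq_true, if_false, Bool.not_false, if_true]
  rw [he, PySem.List.foldl_append_if_eq_filter]

lemma inv_stale (g : List (Int × List Int)) (w : List (Int × Int)) {rest vis : List Int} {v minv : Int}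
    (hI : LoopInv g w (rest ++ [v]) vis minv) (hv : v ∈ vis) : LoopInv g w rest vis minv := by
  refine ⟨hI.1, ?_⟩
  intro i h hx
  have h' : i < (rest ++ [v]).length := by simp; omega
  have e : (rest ++ [v])[i]'h' = rest[i]'h := List.getElem_append_left h
  obtain ⟨h1, h2⟩ := hI.2 i h' (by rw [e]; exact hx)
  rw [e] at h1 h2
  refine ⟨h1, ?_⟩
  intro u hu
  have hd : (rest ++ [v]).drop (i + 1) = rest.drop (i + 1) ++ [v] :=
    List.drop_append_of_le_length (by omega)
  rcases h2 u hu with hm | hm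
  · exact Or.inl hm
  · rw [hd] at hm
    rcases List.mem_append.mp hm with hm | hm
    · exact Or.inr hm
    · rw [List.mem_singleton.mp hm]
      exact Or.inl hv

lemma inv_fresh (g : List (Int × List Int)) (w : List (Int × Int)) {rest vis : List Int} {v minv : Int}
    (hI : LoopInv g w (rest ++ [v]) vis minv) (_hv : v ∉ vis) :
    LoopInv g w (rest ++ (PySem.Dict.getD ⟨g⟩ v []).filter (fun u => !PySem.Set.contains (PySem.Set.add vis v) u))
      (PySem.Set.add vis v) (min minv (PySem.Dict.getD ⟨w⟩ v 0)) := by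
  refine ⟨le_trans (min_le_left _ _) hI.1, ?_⟩
  set vis' := PySem.Set.add vis v with hvis'
  set P := (PySem.Dict.getD ⟨g⟩ v []).filter (fun u => !PySem.Set.contains vis' u) with hP
  intro i h hx
  by_cases hi : i < rest.length
  · have h0 : i < (rest ++ [v]).length := by simp; omega
    have e : (rest ++ P)[i]'h = rest[i]'hi := List.getElem_append_left hi
    have e2 : (rest ++ [v])[i]'h0 = rest[i]'hi := List.getElem_append_left hi
    have hdP : (rest ++ P).drop (i + 1) = rest.drop (i + 1) ++ P :=
      List.drop_append_of_le_length (by omega)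
    rw [e] at hx ⊢
    rcases (PySem.Set.mem_add vis v (rest[i]'hi)).mp hx with hv1 | hv2
    · obtain ⟨h1, h2⟩ := hI.2 i h0 (by rw [e2]; exact hv1)
      rw [e2] at h1 h2
      refine ⟨le_trans (min_le_left _ _) h1, ?_⟩
      intro u hu
      rcases h2 u hu with hm | hm
      · exact Or.inl (subset_add vis v hm)
      · have hd : (rest ++ [v]).drop (i + 1) = rest.drop (i + 1) ++ [v] :=
          List.drop_append_of_le_length (by omega)
        rw [hd] at hm
        rcases List.mem_append.mp hm with hm | hm
        · exact Or.inr (by rw [hdP]; exact List.mem_append_left _ hm)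
        · rw [List.mem_singleton.mp hm]
          exact Or.inl ((PySem.Set.mem_add vis v v).mpr (Or.inr rfl))
    · rw [hv2]
      refine ⟨min_le_right _ _, ?_⟩
      intro u hu
      by_cases hc : u ∈ vis'
      · exact Or.inl hc
      · refine Or.inr ?_
        rw [hdP]
        refine List.mem_append_right _ ?_
        rw [hP]
        exact List.mem_filter.mpr ⟨hu, by rw [contains_false hc]; rfl⟩
  · exfalso
    have hlen : i - rest.length < P.length := by simp at h; omega
    have e : (rest ++ P)[i]'h = P[i - rest.length]'hlen :=
      List.getElem_append_right (by omega)
    have hmem : (rest ++ P)[i]'h ∈ P := by rw [e]; exact List.getElem_mem hlen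
    have hb := List.of_mem_filter hmem
    rw [contains_true hx] at hb
    simp at hb

lemma dfsLoop_nil (g : List (Int × List Int)) (w : List (Int × Int)) (f : Nat) (minv : Int) (vis : List Int) :
    dfsLoop g w (f + 1) [] minv vis = (minv, vis) := by
  simp only [dfsLoop]
  rfl

lemma dfsLoop_step (g : List (Int × List Int)) (w : List (Int × Int)) (f : Nat)
    (rest : List Int) (v : Int) (minv : Int) (vis : List Int) :
    dfsLoop g w (f + 1) (rest ++ [v]) minv vis =
      dfsLoop g w f
        (rest ++ (PySem.Dict.getD ⟨g⟩ v []).filter (fun u => !PySem.Set.contains (PySem.Set.add vis v) u))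
        (min minv (PySem.Dict.getD ⟨w⟩ v 0)) (PySem.Set.add vis v) := by
  simp only [dfsLoop, PySem.List.pop?_last, if_add, foldl_push]

lemma bridge (g : List (Int × List Int)) (w : List (Int × Int)) :
    ∀ (fA : Nat) (stack : List Int) (minv : Int) (vis : List Int) (fB : Nat),
      LoopInv g w stack vis minv → mu g stack vis < fA → Ucard g vis ≤ fB →
      dfsLoop g w fA stack minv vis = goLB g w fB stack.reverse minv vis := by
  intro fA
  induction fA with
  | zero => intro stack minv vis fB _ hmu _; exact absurd hmu (Nat.not_lt_zero _)
  | succ fA ih =>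
    intro stack minv vis fB hI hmu hU
    rcases List.eq_nil_or_concat stack with rfl | ⟨rest, v, hst⟩
    · rw [dfsLoop_nil, List.reverse_nil, goLB_nil]
    · rw [List.concat_eq_append] at hst
      subst hst
      rw [dfsLoop_step]
      have hrev : (rest ++ [v]).reverse = v :: rest.reverse := by simp
      rw [hrev]
      by_cases hv : v ∈ vis
      · -- stale pop: a no-op on both sides
        have hadd : PySem.Set.add vis v = vis := by rw [PySem.Set.add, if_pos (contains_true hv)]
        rw [hadd]
        have hlen : rest.length < (rest ++ [v]).length := by simp
        have e : (rest ++ [v])[rest.length]'hlen = v := by simp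
        obtain ⟨h1, h2⟩ := hI.2 rest.length hlen (by rw [e]; exact hv)
        rw [e] at h1 h2
        have hfil : (PySem.Dict.getD ⟨g⟩ v []).filter (fun u => !PySem.Set.contains vis u) = [] := by
          apply List.filter_eq_nil_iff.mpr
          intro u hu
          rcases h2 u hu with hm | hm
          · simp [hm]
          · rw [List.drop_eq_nil_of_le (by simp)] at hm
            exact absurd hm (List.not_mem_nil)
        rw [hfil, List.append_nil, min_eq_left h1]
        rw [goLB_cons_mem g w fB rest.reverse minv hv]
        refine ih rest minv vis fB (inv_stale g w hI hv) ?_ hU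
        unfold mu at hmu ⊢
        simp only [List.length_append, List.length_singleton] at hmu
        omega
      · -- fresh pop
        rw [goLB_cons_not_mem g w fB rest.reverse minv hv]
        have hIv := inv_fresh g w hI hv
        have hgo : goB g w fB v vis =
            goLB g w fB ((PySem.Dict.getD ⟨g⟩ v []).filter
              (fun u => !PySem.Set.contains (PySem.Set.add vis v) u)).reverse
              (min 99999999999 (PySem.Dict.getD ⟨w⟩ v 0)) (PySem.Set.add vis v) := by
          by_cases hk : v ∈ keysF g
          · have hU1 : Ucard g vis = Ucard g (PySem.Set.add vis v) + 1 := Ucard_add_key g vis v hk hv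
            obtain ⟨b, rfl⟩ : ∃ b, fB = b + 1 := ⟨fB - 1, by omega⟩
            simp only [goB]
            rw [goLB_filter g w b (PySem.Set.add vis v) _ _ _ (fun x hx => hx)]
            rw [List.filter_reverse]
            exact goLB_fuelirr g w (Ucard g (PySem.Set.add vis v)) _ _ _ b (b + 1)
              (le_refl _) (by omega) (by omega)
          · have hG : PySem.Dict.getD ⟨g⟩ v [] = ([] : List Int) :=
              getD_nonkey g v [] (fun hm => hk ((mem_keysF g v).mpr hm))
            rw [goB_nonkey g w fB v vis hG, hG, List.filter_nil, List.reverse_nil, goLB_nil]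
        rw [hgo]
        have hUb : Ucard g (PySem.Set.add vis v) ≤ fB :=
          le_trans (Ucard_mono g (subset_add vis v)) hU
        have hmunew : mu g (rest ++ (PySem.Dict.getD ⟨g⟩ v []).filter
            (fun u => !PySem.Set.contains (PySem.Set.add vis v) u)) (PySem.Set.add vis v) < fA := by
          by_cases hk : v ∈ keysF g
          · have hS := Ssum_add_key g vis v hk hv
            have hPle := List.length_filter_le
              (fun u => !PySem.Set.contains (PySem.Set.add vis v) u) (PySem.Dict.getD ⟨g⟩ v [])
            unfold mu at hmu ⊢
            simp only [List.length_append, List.length_singleton] at hmu ⊢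
            omega
          · have hG : PySem.Dict.getD ⟨g⟩ v [] = ([] : List Int) :=
              getD_nonkey g v [] (fun hm => hk ((mem_keysF g v).mpr hm))
            have hS : Ssum g (PySem.Set.add vis v) = Ssum g vis := by
              unfold Ssum
              rw [filter_add_nonkey g vis v hk]
            rw [hG, List.filter_nil, List.append_nil]
            unfold mu at hmu ⊢
            simp only [List.length_append, List.length_singleton] at hmu
            omega
        rw [ih _ _ _ fB hIv hmunew hUb]
        rw [List.reverse_append, goLB_append]
        have hmin : min minv (PySem.Dict.getD ⟨w⟩ v 0) =
            min minv (min 99999999999 (PySem.Dict.getD ⟨w⟩ v 0)) := by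
          rw [← min_assoc, min_eq_left hI.1]
        rw [hmin, goLB_min]

-- ===== VERDICT (by name: the statement is the Claim_ definition above) =====
theorem dfs_spec : Claim_equal_dfs := by
  intro vertex visited graph weights _hDom _hPre
  show dfs vertex visited graph weights = dfs_alt vertex visited graph weights
  unfold dfs dfs_alt dfsFuel
  have e2 : ((graph.map Prod.fst).toFinset.sum (fun k => 1 + (PySem.Dict.getD ⟨graph⟩ k []).length)) + 2 =
      (((graph.map Prod.fst).toFinset.sum (fun k => 1 + (PySem.Dict.getD ⟨graph⟩ k []).length)) + 1) + 1 := rfl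
  rw [e2, show ([vertex] : List Int) = [] ++ [vertex] from rfl, dfsLoop_step, List.nil_append]
  simp only [goB]
  rw [goLB_filter graph weights graph.length (PySem.Set.add visited vertex) _ _ _ (fun x hx => hx),
    List.filter_reverse]
  have hI : LoopInv graph weights
      ((PySem.Dict.getD ⟨graph⟩ vertex []).filter
        (fun u => !PySem.Set.contains (PySem.Set.add visited vertex) u))
      (PySem.Set.add visited vertex)
      (min 99999999999 (PySem.Dict.getD ⟨weights⟩ vertex 0)) := by
    refine ⟨min_le_left _ _, ?_⟩
    intro i h hx
    exfalso
    have hmem := List.getElem_mem h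
    have hb := List.of_mem_filter hmem
    rw [contains_true hx] at hb
    simp at hb
  have hU : Ucard graph (PySem.Set.add visited vertex) ≤ graph.length := by
    calc Ucard graph (PySem.Set.add visited vertex) ≤ (keysF graph).card :=
          Finset.card_filter_le _ _
      _ ≤ (graph.map Prod.fst).length := List.toFinset_card_le _
      _ = graph.length := List.length_map _
  have hle : Ssum graph (PySem.Set.add visited vertex) ≤
      ((graph.map Prod.fst).toFinset.sum (fun k => 1 + (PySem.Dict.getD ⟨graph⟩ k []).length)) :=
    Finset.sum_le_sum_of_subset (Finset.filter_subset _ _)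
  have hmu : mu graph
      ((PySem.Dict.getD ⟨graph⟩ vertex []).filter
        (fun u => !PySem.Set.contains (PySem.Set.add visited vertex) u))
      (PySem.Set.add visited vertex) <
      ((graph.map Prod.fst).toFinset.sum (fun k => 1 + (PySem.Dict.getD ⟨graph⟩ k []).length)) + 1 := by
    by_cases hv : vertex ∈ visited
    · have hadd : PySem.Set.add visited vertex = visited := by
        rw [PySem.Set.add, if_pos (contains_true hv)]
      by_cases hk : vertex ∈ keysF graph
      · -- vertex already visited but a key: its summand is still available in the fuel
        have hPle := List.length_filter_le
          (fun u => !PySem.Set.contains (PySem.Set.add visited vertex) u)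
          (PySem.Dict.getD ⟨graph⟩ vertex [])
        have hsub : (keysF graph).filter (fun k => ¬ k ∈ visited) ⊆ (keysF graph).erase vertex := by
          intro x hx
          simp only [Finset.mem_filter, Finset.mem_erase] at hx ⊢
          exact ⟨fun he => hx.2 (he ▸ hv), hx.1⟩
        have h1 : Ssum graph visited ≤
            ((keysF graph).erase vertex).sum (fun k => 1 + (PySem.Dict.getD ⟨graph⟩ k []).length) :=
          Finset.sum_le_sum_of_subset hsub
        have h2 : ((keysF graph).erase vertex).sum (fun k => 1 + (PySem.Dict.getD ⟨graph⟩ k []).length) +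
            (1 + (PySem.Dict.getD ⟨graph⟩ vertex []).length) =
            (keysF graph).sum (fun k => 1 + (PySem.Dict.getD ⟨graph⟩ k []).length) :=
          Finset.sum_erase_add _ _ hk
        have hkeq : (keysF graph).sum (fun k => 1 + (PySem.Dict.getD ⟨graph⟩ k []).length) =
            ((graph.map Prod.fst).toFinset.sum (fun k => 1 + (PySem.Dict.getD ⟨graph⟩ k []).length)) := rfl
        unfold mu
        rw [hadd] at hPle ⊢
        omega
      · have hG : PySem.Dict.getD ⟨graph⟩ vertex [] = ([] : List Int) :=
          getD_nonkey graph vertex [] (fun hm => hk ((mem_keysF graph vertex).mpr hm))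
        rw [hG, List.filter_nil]
        unfold mu
        simp only [List.length_nil, Nat.zero_add]
        omega
    · by_cases hk : vertex ∈ keysF graph
      · have hS := Ssum_add_key graph visited vertex hk hv
        have hSv : Ssum graph visited ≤
            ((graph.map Prod.fst).toFinset.sum (fun k => 1 + (PySem.Dict.getD ⟨graph⟩ k []).length)) :=
          Finset.sum_le_sum_of_subset (Finset.filter_subset _ _)
        have hPle := List.length_filter_le
          (fun u => !PySem.Set.contains (PySem.Set.add visited vertex) u)
          (PySem.Dict.getD ⟨graph⟩ vertex [])
        unfold mu
        omega
      · have hG : PySem.Dict.getD ⟨graph⟩ vertex [] = ([] : List Int) :=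
          getD_nonkey graph vertex [] (fun hm => hk ((mem_keysF graph vertex).mpr hm))
        rw [hG, List.filter_nil]
        unfold mu
        simp only [List.length_nil, Nat.zero_add]
        omega
  exact bridge graph weights _ _ _ _ graph.length hI hmu hU
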